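-- pv_equiv track=rewrite | github.com/tyrakis/Mortgage-Investment | pages/🧪_Calibration.py | pick_default_column
-- ===== SOURCE A (Python) =====
-- from typing import Any, Dict, List, Optional, Tuple
--
-- def pick_default_column(cols: List[str], keywords: List[str]) -> Optional[str]:
--     cands = []
--     for c in cols:
--         lc = str(c).lower()
--         score = sum(1 for k in keywords if k in lc)
--         if score:
--             cands.append((score, c))
--     if not cands:
--         return None
--     cands.sort(reverse=True)
--     return cands[0][1]
-- ===== SOURCE B (Python) =====
-- def pick_default_column(cols, keywords):
--     best = None
--     for c in cols:
--         lc = str(c).lower()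
--         score = sum(1 for k in keywords if k in lc)
--         if score and (best is None or (score, c) > best):
--             best = (score, c)
--     return best[1] if best is not None else None
-- ===== Notes on version B (the rewrite author's own statement) =====
-- stated objective: simpler
-- what changed: B drops A's candidate-list accumulation and reverse sort, keeping a single running best (score, column) pair updated by Python tuple comparison in one pass.
import Mathlib
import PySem

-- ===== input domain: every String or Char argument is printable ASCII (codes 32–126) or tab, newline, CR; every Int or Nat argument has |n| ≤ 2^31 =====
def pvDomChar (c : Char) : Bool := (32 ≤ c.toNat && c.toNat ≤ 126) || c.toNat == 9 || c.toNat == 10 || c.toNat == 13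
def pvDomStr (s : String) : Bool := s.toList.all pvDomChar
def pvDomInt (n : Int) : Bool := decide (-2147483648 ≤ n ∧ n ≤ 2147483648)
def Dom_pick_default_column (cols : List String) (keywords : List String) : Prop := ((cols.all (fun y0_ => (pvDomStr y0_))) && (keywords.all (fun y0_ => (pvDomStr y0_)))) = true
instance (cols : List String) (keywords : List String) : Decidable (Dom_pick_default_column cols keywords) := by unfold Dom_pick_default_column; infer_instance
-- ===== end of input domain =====

-- B replaces A's candidate list + reverse sort by a single running best (score, column) pair: simpler, no intermediate list, no sort.

-- shared helper: score = sum(1 for k in keywords if k in str(c).lower()) — identical line in both Pythons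
def pvScore (keywords : List String) (c : String) : Int :=
  let lc := PySem.Str.lower c
  (keywords.map (fun k => if PySem.Str.isIn k lc then (1 : Int) else 0)).sum

-- ===== PORT A =====
def pick_default_column (cols : List String) (keywords : List String) : Option String :=
  let cands : List (Int × String) :=
    cols.foldl (fun cands c =>
      let score := pvScore keywords c
      if score ≠ 0 then cands ++ [(score, c)] else cands) []
  if cands = [] then none
  else (PySem.List.pyGet? (PySem.List.sorted2 cands (·.1) (·.2) true) 0).map (·.2)

-- ===== PORT B =====
-- Python tuple comparison '(score, c) > best' (best = None counts as beaten)
def pvBeats (best : Option (Int × String)) (score : Int) (c : String) : Bool :=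
  match best with
  | none => true
  | some (bs, bc) => decide (bs < score) || (decide (bs = score) && decide (bc < c))

def pick_default_column_alt (cols : List String) (keywords : List String) : Option String :=
  let best : Option (Int × String) :=
    cols.foldl (fun best c =>
      let score := pvScore keywords c
      if score ≠ 0 ∧ pvBeats best score c then some (score, c) else best) none
  best.map (·.2)

-- ===== PRECONDITION & SPEC =====
def Spec_pick_default_column (cols : List String) (keywords : List String) (out : Option String) : Prop := out = pick_default_column_alt cols keywords
instance (cols : List String) (keywords : List String) (out : Option String) : Decidable (Spec_pick_default_column cols keywords out) := by unfold Spec_pick_default_column; infer_instance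

-- ===== CLAIM (what is proved, stated in full; the proofs are below) =====
def Claim_equal_pick_default_column : Prop := ∀ (cols : List String) (keywords : List String), Dom_pick_default_column cols keywords → Spec_pick_default_column cols keywords (pick_default_column cols keywords)

-- ===== LEMMAS AND PROOFS =====

def pvGt : (Int × String) → (Int × String) → Bool := fun x y =>
  decide (y.1 < x.1) || (decide (y.1 = x.1) && decide (y.2 < x.2))


-- sorted2's reverse "before" agrees with Python tuple >
theorem before_eq_gt :
    (fun (a b : Int × String) =>
      decide (b.1 < a.1) || (!decide (a.1 < b.1) && decide (b.2 < a.2))) = pvGt := by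
  funext a b
  by_cases h1 : b.1 < a.1 <;> by_cases h2 : a.1 < b.1 <;>
    simp [pvGt, h1, h2] <;> intro _ <;> omega

-- running-max step over an optional best, with the strict "greater" test `gt x y` = "x beats y"
def pvCombine {α : Type} (gt : α → α → Bool) (o : Option α) (x : α) : Option α :=
  match o with
  | none => some x
  | some y => if gt x y then some x else some y

theorem head_insertBy {α : Type} (before : α → α → Bool) (x : α) (ys : List α) :
    (PySem.List.insertBy before x ys).head? = pvCombine before ys.head? x := by
  cases ys with
  | nil => rfl
  | cons y t =>
    simp only [PySem.List.insertBy, pvCombine, List.head?_cons]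
    split <;> rfl

theorem head_foldl_insertBy {α : Type} (before : α → α → Bool) (l : List α) (acc : List α) :
    (l.foldl (fun acc x => PySem.List.insertBy before x acc) acc).head? =
      l.foldl (pvCombine before) acc.head? := by
  induction l generalizing acc with
  | nil => rfl
  | cons x l ih => simp only [List.foldl_cons, ih, head_insertBy]

theorem pick_default_column_spec : Claim_equal_pick_default_column := by
  intro cols keywords _
  unfold Spec_pick_default_column pick_default_column pick_default_column_alt
  simp only []
  -- rewrite A's cands
  rw [PySem.List.foldl_append_ite (p := fun c => pvScore keywords c ≠ 0) (f := fun c => (pvScore keywords c, c))]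
  simp only [List.nil_append]
  -- rewrite B
  rw [PySem.List.foldl_congr_mem cols _
      (fun best c => if pvScore keywords c ≠ 0 then pvCombine pvGt best (pvScore keywords c, c) else best) none
      (by
        intro best c _
        by_cases h : pvScore keywords c ≠ 0
        · cases best with
          | none => simp [h, pvBeats, pvCombine]
          | some y =>
            obtain ⟨bs, bc⟩ := y
            by_cases hb : pvBeats (some (bs, bc)) (pvScore keywords c) c = true <;>
              simp_all [pvBeats, pvCombine, pvGt]
        · simp [h])]
  rw [PySem.List.foldl_ite_eq_foldl_filter (p := fun c => pvScore keywords c ≠ 0)]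
  rw [← List.foldl_map (f := fun c => (pvScore keywords c, c)) (g := pvCombine pvGt)]
  set cands := (List.filter (fun x => decide (pvScore keywords x ≠ 0)) cols).map
      (fun c => (pvScore keywords c, c)) with hc
  cases hcn : cands with
  | nil => rfl
  | cons a t =>
    rw [if_neg (List.cons_ne_nil a t)]
    have : PySem.List.sorted2 (a :: t) (·.1) (·.2) true =
        (a :: t).foldl (fun acc x => PySem.List.insertBy
          (fun p q => decide (q.1 < p.1) || (!decide (p.1 < q.1) && decide (q.2 < p.2))) x acc) [] := rfl
    rw [this, ← hcn]
    have hh := head_foldl_insertBy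
      (fun (p q : Int × String) => decide (q.1 < p.1) || (!decide (p.1 < q.1) && decide (q.2 < p.2))) cands []
    have hget : ∀ (l : List (Int × String)), PySem.List.pyGet? l 0 = l.head? := by
      intro l; cases l <;> simp [PySem.List.pyGet?, PySem.List.pyIdx?]
    rw [hget, hh, before_eq_gt]
    rfl
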